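-- pv_equiv track=rewrite | github.com/hzn666/leetcode | HWJ/HJ18.py | mask_judge
-- ===== SOURCE A (Python) =====
-- def mask_judge(mask):
--     # 判断子网掩码
--     res = ""
--     for m in mask:
--         try:
--             m = int(m)
--         except:
--             return False
--
--         if m > 255 or m < 0:
--             return False
--         binary_string = bin(m)[2:]
--         binary_string = "0" * (8-len(binary_string)) + binary_string
--         res += binary_string
--
--     if '01' in res or '0' not in res:
--         return False
--     return True
-- ===== SOURCE B (Python) =====
-- def mask_judge(mask):
--     # octet-level automaton: a run of 255s, then one boundary octet, then zeros
--     phase_ones = True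
--     has_zero = False
--     for m in mask:
--         try:
--             m = int(m)
--         except:
--             return False
--         if m > 255 or m < 0:
--             return False
--         if phase_ones:
--             if m == 255:
--                 continue
--             if m not in (0, 128, 192, 224, 240, 248, 252, 254):
--                 return False
--             phase_ones = False
--             has_zero = True
--         elif m != 0:
--             return False
--     return has_zero
-- ===== Notes on version B (the rewrite author's own statement) =====
-- stated objective: alternative
-- what changed: A builds the full binary string of all octets and then scans it for '01' and '0'; B never builds a string: it runs an octet-level automaton (a run of 255s, then one octet from {0,128,192,224,240,248,252,254}, then only 0s) over the parsed octets with two booleans of state.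
import Mathlib
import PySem

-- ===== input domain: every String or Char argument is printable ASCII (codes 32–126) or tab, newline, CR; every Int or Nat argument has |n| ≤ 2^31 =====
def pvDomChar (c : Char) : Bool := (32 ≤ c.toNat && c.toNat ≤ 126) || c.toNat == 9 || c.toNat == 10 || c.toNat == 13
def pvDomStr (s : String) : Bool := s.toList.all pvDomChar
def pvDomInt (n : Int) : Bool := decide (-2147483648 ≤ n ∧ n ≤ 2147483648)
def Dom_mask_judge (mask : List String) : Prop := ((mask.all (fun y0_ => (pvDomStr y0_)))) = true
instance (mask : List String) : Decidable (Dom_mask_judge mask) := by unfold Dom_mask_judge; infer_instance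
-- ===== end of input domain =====

-- B replaces A's 32-bit string scan by an octet-level automaton (run of 255s, one boundary octet, then zeros): alternative decomposition, no string building.

-- ===== PORT A =====
-- bin(n) for n ≥ 1, most-significant bit first (exact for the nonnegative ints A feeds it)
-- fuel = n makes the recursion structural (n/2 < n, so fuel n always suffices)
def binAux : Nat → Nat → List Char
  | _, 0 => []
  | 0, _ + 1 => []
  | fuel + 1, n + 1 => binAux fuel ((n + 1) / 2) ++ [if (n + 1) % 2 = 1 then '1' else '0']

def binNat (n : Nat) : List Char := binAux n n

-- binary_string = "0"*(8-len(bin(m)[2:])) + bin(m)[2:]   (Python bin(0)[2:] = "0"; "0"*negative = "")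
def bits8 (m : Int) : List Char :=
  let bs := if m = 0 then ['0'] else binNat m.toNat
  List.replicate (8 - bs.length) '0' ++ bs

-- '01' in res  (exact substring test for the fixed two-character pattern)
def has01 : List Char → Bool
  | [] => false
  | [_] => false
  | a :: b :: t => (a == '0' && b == '1') || has01 (b :: t)

-- the for-loop of A: none = an early `return False`, some res = the accumulated bit string
def maskLoopA : List String → List Char → Option (List Char)
  | [], res => some res
  | s :: rest, res =>
    match PySem.Int.ofStr? s with
    | none => none
    | some m => if m > 255 || m < 0 then none else maskLoopA rest (res ++ bits8 m)

def mask_judge (mask : List String) : Bool :=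
  match maskLoopA mask [] with
  | none => false
  | some res => if has01 res || !(res.contains '0') then false else true

-- ===== PORT B =====
def maskLoopB : List String → Bool → Bool → Bool
  | [], _, has_zero => has_zero
  | s :: rest, phase_ones, has_zero =>
    match PySem.Int.ofStr? s with
    | none => false
    | some m =>
      if m > 255 || m < 0 then false
      else if phase_ones then
        if m == 255 then maskLoopB rest phase_ones has_zero
        else if [0, 128, 192, 224, 240, 248, 252, 254].contains m then maskLoopB rest false true
        else false
      else if m != 0 then false else maskLoopB rest phase_ones has_zero

def mask_judge_alt (mask : List String) : Bool := maskLoopB mask true false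

-- ===== PRECONDITION & SPEC =====
def Spec_mask_judge (mask : List String) (out : Bool) : Prop := out = mask_judge_alt mask
instance (mask : List String) (out : Bool) : Decidable (Spec_mask_judge mask out) := by unfold Spec_mask_judge; infer_instance

-- ===== CLAIM (what is proved, stated in full; the proofs are below) =====
def Claim_equal_mask_judge : Prop := ∀ (mask : List String), Dom_mask_judge mask → Spec_mask_judge mask (mask_judge mask)

-- ===== LEMMAS AND PROOFS =====

-- A's result from an intermediate loop state
def runA (rest : List String) (res : List Char) : Bool :=
  match maskLoopA rest res with
  | none => false
  | some r => if has01 r || !(r.contains '0') then false else true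

lemma has01_cons (c : Char) (x : List Char) :
    has01 (c :: x) = match x with | [] => false | d :: _ => ((c == '0' && d == '1') || has01 x) := by
  cases x <;> rfl

lemma has01_append_right (u : List Char) : ∀ l, has01 l = true → has01 (l ++ u) = true := by
  intro l
  induction l with
  | nil => simp [has01]
  | cons c x ih =>
    intro h
    cases x with
    | nil => simp [has01] at h
    | cons d t =>
      rw [has01_cons] at h
      rw [List.cons_append, has01_cons]
      simp only [List.cons_append]
      rcases Bool.or_eq_true_iff.mp h with h1 | h2
      · exact Bool.or_eq_true_iff.mpr (Or.inl h1)
      · exact Bool.or_eq_true_iff.mpr (Or.inr (ih h2))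

lemma has01_cons_of (c : Char) (l : List Char) (h : has01 l = true) : has01 (c :: l) = true := by
  cases l with
  | nil => simp [has01] at h
  | cons d t => rw [has01_cons]; exact Bool.or_eq_true_iff.mpr (Or.inr h)

lemma has01_append_left (l : List Char) (h : has01 l = true) : ∀ t, has01 (t ++ l) = true := by
  intro t
  induction t with
  | nil => simpa
  | cons c t ih => exact has01_cons_of c _ ih

-- once '01' is in res, A's final answer is False whatever comes next
lemma runA_false_of_has01 : ∀ rest res, has01 res = true → runA rest res = false := by
  intro rest
  induction rest with
  | nil => intro res h; simp [runA, maskLoopA, h]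
  | cons s rest ih =>
    intro res h
    unfold runA maskLoopA
    cases PySem.Int.ofStr? s with
    | none => rfl
    | some m =>
      by_cases hm : m > 255 || m < 0
      · simp [hm]
      · simp only [hm]
        exact ih (res ++ bits8 m) (has01_append_right _ _ h)

lemma has01_ones (a : Nat) : has01 (List.replicate a '1') = false := by
  induction a with
  | zero => rfl
  | succ n ih =>
    rw [List.replicate_succ, has01_cons]
    cases n with
    | zero => rfl
    | succ k => rw [List.replicate_succ]; simpa using ih

lemma has01_zeros (b : Nat) : has01 (List.replicate b '0') = false := by
  induction b with
  | zero => rfl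
  | succ n ih =>
    rw [List.replicate_succ, has01_cons]
    cases n with
    | zero => rfl
    | succ k => rw [List.replicate_succ]; simpa using ih

lemma has01_ones_zeros (a b : Nat) : has01 (List.replicate a '1' ++ List.replicate b '0') = false := by
  induction a with
  | zero => simpa using has01_zeros b
  | succ n ih =>
    rw [List.replicate_succ, List.cons_append, has01_cons]
    cases hx : List.replicate n '1' ++ List.replicate b '0' with
    | nil => rfl
    | cons d t =>
      have hd : d = '1' ∨ d = '0' := by
        have : d ∈ List.replicate n '1' ++ List.replicate b '0' := by rw [hx]; exact List.mem_cons_self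
        rcases List.mem_append.mp this with h | h
        · exact Or.inl (List.eq_of_mem_replicate h)
        · exact Or.inr (List.eq_of_mem_replicate h)
      have h2 : has01 (d :: t) = false := by rw [← hx]; exact ih
      rcases hd with rfl | rfl <;> simp [h2]

set_option maxRecDepth 4000 in
-- per-octet facts, by kernel evaluation over all 256 values
lemma bits8_bad_all : ((List.range 256).all (fun n =>
    decide (n ∈ [0, 128, 192, 224, 240, 248, 252, 254, 255]) || has01 (bits8 (n : Int)))) = true := by
  decide

lemma bits8_bad (n : Nat) (h2 : n < 256) (hn : n ∉ [0, 128, 192, 224, 240, 248, 252, 254, 255]) :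
    has01 (bits8 (n : Int)) = true := by
  have := List.all_eq_true.mp bits8_bad_all n (List.mem_range.mpr h2)
  simpa [hn] using this

set_option maxRecDepth 4000 in
lemma bits8_pos_all : ((List.range 256).all (fun n =>
    decide (n = 0) || has01 ('0' :: bits8 (n : Int)))) = true := by
  decide

lemma bits8_pos (n : Nat) (h1 : 1 ≤ n) (h2 : n < 256) : has01 ('0' :: bits8 (n : Int)) = true := by
  have := List.all_eq_true.mp bits8_pos_all n (List.mem_range.mpr h2)
  have hne : ¬ n = 0 := by omega
  simpa [hne] using this

lemma toNat_cast (m : Int) (h : ¬ (m > 255 || m < 0) = true) : m = ((m.toNat : Nat) : Int) ∧ m.toNat < 256 := by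
  simp only [Bool.or_eq_true, decide_eq_true_eq, not_or] at h
  constructor
  · omega
  · omega

-- main invariant: A from res = 1^a (resp. 1^a 0^b, b ≥ 1) equals B from state (true,false) (resp. (false,true))
lemma main_inv : ∀ rest : List String, ∀ a b : Nat,
    (runA rest (List.replicate a '1') = maskLoopB rest true false) ∧
    (1 ≤ b → runA rest (List.replicate a '1' ++ List.replicate b '0') = maskLoopB rest false true) := by
  intro rest
  induction rest with
  | nil =>
    intro a b
    constructor
    · simp [runA, maskLoopA, maskLoopB, has01_ones, List.mem_replicate]
    · intro hb
      simp [runA, maskLoopA, maskLoopB, has01_ones_zeros, List.mem_replicate]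
      omega
  | cons s rest ih =>
    intro a b
    constructor
    · unfold runA maskLoopA maskLoopB
      cases PySem.Int.ofStr? s with
      | none => rfl
      | some m =>
        by_cases hm : (m > 255 || m < 0) = true
        · simp [hm]
        · simp only [hm, if_false, Bool.false_eq_true]
          obtain ⟨hcast, hlt⟩ := toNat_cast m hm
          by_cases h255 : m = 255
          · subst h255
            have hb : bits8 255 = List.replicate 8 '1' := by decide
            rw [hb, ← List.replicate_add]
            simp only [show ((255:Int) == 255) = true from rfl, if_true]
            exact (ih (a + 8) b).1
          · by_cases hv : ([0, 128, 192, 224, 240, 248, 252, 254] : List Int).contains m = true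
            · -- boundary octet: bits8 m = 1^k ++ 0^(8-k)
              simp only [beq_iff_eq, h255, if_false, hv, if_true]
              have hmem : m ∈ ([0, 128, 192, 224, 240, 248, 252, 254] : List Int) := by
                simpa [List.contains_eq_mem] using hv
              fin_cases hmem <;>
                · first
                  | (rw [show bits8 0 = List.replicate 0 '1' ++ List.replicate 8 '0' from by decide,
                        ← List.append_assoc, ← List.replicate_add]; exact (ih _ 8).2 (by omega))
                  | (rw [show bits8 128 = List.replicate 1 '1' ++ List.replicate 7 '0' from by decide,
                        ← List.append_assoc, ← List.replicate_add]; exact (ih _ 7).2 (by omega))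
                  | (rw [show bits8 192 = List.replicate 2 '1' ++ List.replicate 6 '0' from by decide,
                        ← List.append_assoc, ← List.replicate_add]; exact (ih _ 6).2 (by omega))
                  | (rw [show bits8 224 = List.replicate 3 '1' ++ List.replicate 5 '0' from by decide,
                        ← List.append_assoc, ← List.replicate_add]; exact (ih _ 5).2 (by omega))
                  | (rw [show bits8 240 = List.replicate 4 '1' ++ List.replicate 4 '0' from by decide,
                        ← List.append_assoc, ← List.replicate_add]; exact (ih _ 4).2 (by omega))
                  | (rw [show bits8 248 = List.replicate 5 '1' ++ List.replicate 3 '0' from by decide,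
                        ← List.append_assoc, ← List.replicate_add]; exact (ih _ 3).2 (by omega))
                  | (rw [show bits8 252 = List.replicate 6 '1' ++ List.replicate 2 '0' from by decide,
                        ← List.append_assoc, ← List.replicate_add]; exact (ih _ 2).2 (by omega))
                  | (rw [show bits8 254 = List.replicate 7 '1' ++ List.replicate 1 '0' from by decide,
                        ← List.append_assoc, ← List.replicate_add]; exact (ih _ 1).2 (by omega))
            · -- invalid octet: its bits contain '01'; A ends False whatever follows
              simp only [beq_iff_eq, h255, if_false, hv, if_false]
              have hv' : m ∉ ([0, 128, 192, 224, 240, 248, 252, 254] : List Int) := by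
                intro h
                exact absurd (by simpa [List.contains_eq_mem] using h) hv
              have hnot : m.toNat ∉ [0, 128, 192, 224, 240, 248, 252, 254, 255] := by
                intro hc
                simp only [List.mem_cons, List.not_mem_nil, or_false] at hc hv'
                push Not at hv'
                rcases hc with h|h|h|h|h|h|h|h|h <;> omega
              have h01 : has01 (bits8 m) = true := by
                rw [hcast]; exact bits8_bad m.toNat hlt hnot
              have := runA_false_of_has01 rest (List.replicate a '1' ++ bits8 m)
                (has01_append_left _ h01 _)
              simpa [runA] using this
    · intro hb
      unfold runA maskLoopA maskLoopB
      cases PySem.Int.ofStr? s with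
      | none => rfl
      | some m =>
        by_cases hm : (m > 255 || m < 0) = true
        · simp [hm]
        · simp only [hm, if_false, Bool.false_eq_true]
          obtain ⟨hcast, hlt⟩ := toNat_cast m hm
          by_cases h0 : m = 0
          · subst h0
            have hbz : bits8 0 = List.replicate 8 '0' := by decide
            rw [hbz, List.append_assoc, ← List.replicate_add]
            simp only [show ((0:Int) != 0) = false from rfl, Bool.false_eq_true, if_false]
            exact (ih a (b + 8)).2 (by omega)
          · -- nonzero octet after a zero: '0' just before its first '1'
            have hne : (m != 0) = true := by simpa using h0
            simp only [hne, if_true]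
            have hpos : 1 ≤ m.toNat := by
              simp only [Bool.or_eq_true, decide_eq_true_eq, not_or] at hm
              omega
            have h01 : has01 ('0' :: bits8 m) = true := by
              rw [hcast]; exact bits8_pos m.toNat hpos hlt
            have hsplit : List.replicate b '0' ++ bits8 m
                = List.replicate (b - 1) '0' ++ ('0' :: bits8 m) := by
              conv_lhs => rw [show b = (b - 1) + 1 from by omega]
              rw [List.replicate_add]
              simp
            have hres : has01 ((List.replicate a '1' ++ List.replicate b '0') ++ bits8 m) = true := by
              rw [List.append_assoc, hsplit, ← List.append_assoc]
              exact has01_append_left _ h01 _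
            have := runA_false_of_has01 rest _ hres
            simpa [runA] using this

-- ===== VERDICT (by name: the statement is the Claim_ definition above) =====
theorem mask_judge_spec : Claim_equal_mask_judge := by
  intro mask _
  unfold Spec_mask_judge mask_judge mask_judge_alt
  have := (main_inv mask 0 0).1
  simpa [runA, List.replicate] using this
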